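-- pv_equiv track=rewrite | github.com/ricketter1984/MacroIntel | news_scanner/alert_manager.py | classify_alerts
-- ===== SOURCE A (Python) =====
-- def classify_alerts(articles):
--     tier_1 = []
--     tier_2 = []
--     tier_3 = []
--
--     for article in articles:
--         title = article.get("title", "").lower()
--         body = article.get("body", "").lower()
--
--         if any(term in body for term in [
--             "inflation", "fed", "war", "oil crash", "blackrock",
--             "nvidia", "ceasefire", "interest rate", "recession"
--         ]):
--             tier_1.append(article)
--         elif any(term in body for term in [
--             "crypto", "bitcoin", "elon musk", "tesla", "earnings",
--             "apple", "defense", "china", "iran", "election"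
--         ]):
--             tier_2.append(article)
--         else:
--             tier_3.append(article)
--
--     return {
--         "tier_1": tier_1,
--         "tier_2": tier_2,
--         "tier_3": tier_3
--     }
-- ===== SOURCE B (Python) =====
-- # B: table-driven grouping — a tier-classifier function plus a dict comprehension
-- # that filters articles per tier, instead of A's one-pass branch-and-append loop.
-- TIERS = [
--     ("tier_1", ["inflation", "fed", "war", "oil crash", "blackrock",
--                 "nvidia", "ceasefire", "interest rate", "recession"]),
--     ("tier_2", ["crypto", "bitcoin", "elon musk", "tesla", "earnings",
--                 "apple", "defense", "china", "iran", "election"]),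
-- ]
--
-- def _tier(article):
--     body = article.get("body", "").lower()
--     for name, terms in TIERS:
--         if any(term in body for term in terms):
--             return name
--     return "tier_3"
--
-- def classify_alerts(articles):
--     return {name: [a for a in articles if _tier(a) == name]
--             for name in ("tier_1", "tier_2", "tier_3")}
-- ===== Notes on version B (the rewrite author's own statement) =====
-- stated objective: simpler
-- what changed: Replaced A's single loop with three append accumulators and an if/elif/else chain by a table-driven tier classifier (ordered (name, keywords) list) plus a dict comprehension that filters the articles once per tier.
import Mathlib
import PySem

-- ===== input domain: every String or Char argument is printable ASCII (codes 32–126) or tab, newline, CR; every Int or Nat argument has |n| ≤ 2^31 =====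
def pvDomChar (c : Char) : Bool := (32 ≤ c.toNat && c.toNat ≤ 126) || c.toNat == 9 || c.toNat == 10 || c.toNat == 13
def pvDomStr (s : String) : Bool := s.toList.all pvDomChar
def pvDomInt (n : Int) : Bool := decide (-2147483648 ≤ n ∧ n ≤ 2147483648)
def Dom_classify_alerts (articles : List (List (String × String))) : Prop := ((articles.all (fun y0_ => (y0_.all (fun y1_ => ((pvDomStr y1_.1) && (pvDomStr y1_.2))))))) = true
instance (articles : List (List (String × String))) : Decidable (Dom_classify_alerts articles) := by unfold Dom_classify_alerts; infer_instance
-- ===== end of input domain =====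

-- ===== PORT A =====
-- Header: B replaces A's single append-loop with a tier classifier plus per-tier filters (simpler decomposition, same cost).
-- A's for-loop, transliterated: three accumulators, appended in order.
def classify_loop : List (List (String × String)) → List (List (String × String)) → List (List (String × String)) → List (List (String × String)) → (List (List (String × String)) × List (List (String × String)) × List (List (String × String)))
  | [], t1, t2, t3 => (t1, t2, t3)
  | article :: rest, t1, t2, t3 =>
    let _title := PySem.Str.lower ((PySem.Dict.mk article).getD "title" "")
    let body := PySem.Str.lower ((PySem.Dict.mk article).getD "body" "")
    if ["inflation", "fed", "war", "oil crash", "blackrock",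
        "nvidia", "ceasefire", "interest rate", "recession"].any (fun term => PySem.Str.isIn term body) then
      classify_loop rest (t1 ++ [article]) t2 t3
    else if ["crypto", "bitcoin", "elon musk", "tesla", "earnings",
             "apple", "defense", "china", "iran", "election"].any (fun term => PySem.Str.isIn term body) then
      classify_loop rest t1 (t2 ++ [article]) t3
    else
      classify_loop rest t1 t2 (t3 ++ [article])

def classify_alerts (articles : List (List (String × String))) : List (String × List (List (String × String))) :=
  let r := classify_loop articles [] [] []
  [("tier_1", r.1), ("tier_2", r.2.1), ("tier_3", r.2.2)]

-- ===== PORT B =====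
def pvTiers : List (String × List String) :=
  [("tier_1", ["inflation", "fed", "war", "oil crash", "blackrock",
               "nvidia", "ceasefire", "interest rate", "recession"]),
   ("tier_2", ["crypto", "bitcoin", "elon musk", "tesla", "earnings",
               "apple", "defense", "china", "iran", "election"])]

-- B's for-loop over TIERS with early return, as structural recursion on the table
def pvFirstTier : List (String × List String) → String → String
  | [], _ => "tier_3"
  | (name, terms) :: rest, body =>
    if terms.any (fun term => PySem.Str.isIn term body) then name else pvFirstTier rest body

def pvTierOf (article : List (String × String)) : String :=
  let body := PySem.Str.lower ((PySem.Dict.mk article).getD "body" "")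
  pvFirstTier pvTiers body

def classify_alerts_alt (articles : List (List (String × String))) : List (String × List (List (String × String))) :=
  ["tier_1", "tier_2", "tier_3"].map (fun name => (name, articles.filter (fun a => pvTierOf a == name)))

-- ===== PRECONDITION & SPEC =====
def Spec_classify_alerts (articles : List (List (String × String))) (out : List (String × List (List (String × String)))) : Prop := out = classify_alerts_alt articles
instance (articles : List (List (String × String))) (out : List (String × List (List (String × String)))) : Decidable (Spec_classify_alerts articles out) := by unfold Spec_classify_alerts; infer_instance

-- ===== CLAIM (what is proved, stated in full; the proofs are below) =====
def Claim_equal_classify_alerts : Prop := ∀ (articles : List (List (String × String))), Dom_classify_alerts articles → Spec_classify_alerts articles (classify_alerts articles)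

-- ===== LEMMAS AND PROOFS =====
def pvM1 (article : List (String × String)) : Bool :=
  ["inflation", "fed", "war", "oil crash", "blackrock",
   "nvidia", "ceasefire", "interest rate", "recession"].any
    (fun term => PySem.Str.isIn term (PySem.Str.lower ((PySem.Dict.mk article).getD "body" "")))

def pvM2 (article : List (String × String)) : Bool :=
  ["crypto", "bitcoin", "elon musk", "tesla", "earnings",
   "apple", "defense", "china", "iran", "election"].any
    (fun term => PySem.Str.isIn term (PySem.Str.lower ((PySem.Dict.mk article).getD "body" "")))

theorem pvTierOf_eq (a : List (String × String)) :
    pvTierOf a = if pvM1 a then "tier_1" else if pvM2 a then "tier_2" else "tier_3" := rfl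

theorem classify_loop_cons (a : List (String × String))
    (rest : List (List (String × String))) (t1 t2 t3 : List (List (String × String))) :
    classify_loop (a :: rest) t1 t2 t3 =
      if pvM1 a then classify_loop rest (t1 ++ [a]) t2 t3
      else if pvM2 a then classify_loop rest t1 (t2 ++ [a]) t3
      else classify_loop rest t1 t2 (t3 ++ [a]) := rfl

theorem classify_loop_eq (rest : List (List (String × String)))
    (t1 t2 t3 : List (List (String × String))) :
    classify_loop rest t1 t2 t3 =
      (t1 ++ rest.filter (fun a => pvM1 a),
       t2 ++ rest.filter (fun a => !pvM1 a && pvM2 a),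
       t3 ++ rest.filter (fun a => !pvM1 a && !pvM2 a)) := by
  induction rest generalizing t1 t2 t3 with
  | nil => simp [classify_loop]
  | cons a rest ih =>
    rw [classify_loop_cons]
    cases h1 : pvM1 a <;> cases h2 : pvM2 a <;>
      simp [h1, h2, ih]

theorem filter_tier₁ (xs : List (List (String × String))) :
    xs.filter (fun a => pvTierOf a == "tier_1") = xs.filter (fun a => pvM1 a) := by
  apply List.filter_congr
  intro a _
  cases h1 : pvM1 a <;> cases h2 : pvM2 a <;> simp [pvTierOf_eq, h1, h2]

theorem filter_tier₂ (xs : List (List (String × String))) :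
    xs.filter (fun a => pvTierOf a == "tier_2") = xs.filter (fun a => !pvM1 a && pvM2 a) := by
  apply List.filter_congr
  intro a _
  cases h1 : pvM1 a <;> cases h2 : pvM2 a <;> simp [pvTierOf_eq, h1, h2]

theorem filter_tier₃ (xs : List (List (String × String))) :
    xs.filter (fun a => pvTierOf a == "tier_3") = xs.filter (fun a => !pvM1 a && !pvM2 a) := by
  apply List.filter_congr
  intro a _
  cases h1 : pvM1 a <;> cases h2 : pvM2 a <;> simp [pvTierOf_eq, h1, h2]

-- ===== VERDICT (by name: the statement is the Claim_ definition above) =====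
theorem classify_alerts_spec : Claim_equal_classify_alerts := by
  intro articles _
  unfold Spec_classify_alerts
  simp [classify_alerts, classify_alerts_alt, classify_loop_eq,
        filter_tier₁, filter_tier₂, filter_tier₃]
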